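-- pv_equiv track=rewrite | github.com/JuanPiedrahita/CargueMasivo | cuenta.py | definePadre
-- ===== SOURCE A (Python) =====
-- def definePadre(codigo):
-- 	padres = codigo.split("-")
-- 	numPadres = len(padres)-1
-- 	if numPadres == 0:
-- 		return None
-- 	else:
-- 		father = ""
-- 		for i in range(numPadres):
-- 			father += "-" +padres[i]
-- 	return father[1:]
-- ===== SOURCE B (Python) =====
-- def definePadre(codigo):
--     idx = codigo.rfind("-")
--     if idx == -1:
--         return None
--     return codigo[:idx]
-- ===== Notes on version B (the rewrite author's own statement) =====
-- stated objective: simpler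
-- what changed: Replaced split-into-segments plus an accumulation loop that rejoins all-but-last with a single rfind for the last hyphen and one slice up to it.
import Mathlib
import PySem

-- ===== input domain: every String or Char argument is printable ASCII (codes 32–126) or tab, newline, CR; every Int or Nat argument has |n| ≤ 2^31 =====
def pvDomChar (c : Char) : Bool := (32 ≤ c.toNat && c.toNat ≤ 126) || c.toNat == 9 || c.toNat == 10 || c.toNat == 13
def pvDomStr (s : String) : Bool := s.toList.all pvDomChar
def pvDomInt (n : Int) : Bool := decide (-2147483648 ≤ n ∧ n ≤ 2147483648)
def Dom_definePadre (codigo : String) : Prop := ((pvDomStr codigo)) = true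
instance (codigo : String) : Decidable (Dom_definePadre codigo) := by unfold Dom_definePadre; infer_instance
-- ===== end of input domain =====

-- B replaces A's split-into-segments plus rejoin-all-but-last loop by one rfind for the
-- last hyphen and a single slice up to it (objective: simpler).

-- ===== PORT A =====
-- A's body, transliterated over the string's character list (string ops ported via PySem.Chars/List)
def definePadreGo (l : List Char) : Option (List Char) :=
  let padres := PySem.Chars.splitOn l ['-']
  let numPadres : Int := (PySem.List.len padres) - 1
  if numPadres = 0 then none
  else
    -- father += "-" + padres[i]  (index i always in range, so the default of pyGetD is never used)
    let father := (PySem.List.pyRange 0 numPadres).foldl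
      (fun f i => f ++ ('-' :: PySem.List.pyGetD padres i [])) []
    some (PySem.List.slice father (some 1) none)   -- father[1:]

def definePadre (codigo : String) : Option String :=
  (definePadreGo codigo.toList).map String.ofList

-- ===== PORT B =====
def definePadre_alt (codigo : String) : Option String :=
  let idx := PySem.Str.rfind codigo "-"
  if idx = -1 then none else some (PySem.Str.slice codigo none (some idx))

-- ===== PRECONDITION & SPEC =====
def Spec_definePadre (codigo : String) (out : Option String) : Prop := out = definePadre_alt codigo
instance (codigo : String) (out : Option String) : Decidable (Spec_definePadre codigo out) := by unfold Spec_definePadre; infer_instance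

-- ===== CLAIM (what is proved, stated in full; the proofs are below) =====
def Claim_equal_definePadre : Prop := ∀ (codigo : String), Dom_definePadre codigo → Spec_definePadre codigo (definePadre codigo)

-- ===== LEMMAS AND PROOFS =====

-- reference function: `some (everything before the last '-')`, `none` if there is no '-'
def fRef : List Char → Option (List Char)
  | [] => none
  | x :: xs =>
    match fRef xs with
    | some t => some (x :: t)
    | none => if x = '-' then some [] else none

-- clean structural recursion equal to PySem.Chars.splitOn · ['-']
def splitOn' : List Char → List (List Char)
  | [] => [[]]
  | x :: xs => if x = '-' then [] :: splitOn' xs else (splitOn' xs).modifyHead (x :: ·)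

theorem splitOn'_ne_nil (l : List Char) : splitOn' l ≠ [] := by
  cases l with
  | nil => simp [splitOn']
  | cons x xs =>
    simp only [splitOn']
    split_ifs
    · simp
    · cases h : splitOn' xs with
      | nil => exact absurd h (splitOn'_ne_nil xs)
      | cons a t => simp

theorem splitOn_go_eq (l : List Char) : ∀ (fuel : ℕ) (cur : List Char) (acc : List (List Char)),
    l.length < fuel →
    PySem.Chars.splitOn.go ['-'] fuel l cur acc
      = acc.reverse ++ (splitOn' l).modifyHead (cur.reverse ++ ·) := by
  induction l with
  | nil =>
    intro fuel cur acc h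
    match fuel with
    | f + 1 => simp [PySem.Chars.splitOn.go, splitOn']
  | cons x xs ih =>
    intro fuel cur acc h
    match fuel with
    | f + 1 =>
      rw [PySem.Chars.splitOn.go]
      by_cases hx : x = '-'
      · have hp : List.isPrefixOf ['-'] (x :: xs) = true := by simp [List.isPrefixOf, hx]
        rw [if_pos hp]
        simp only [List.length_cons] at h
        rw [show (List.drop (List.length ['-']) (x :: xs)) = xs by simp]
        rw [ih f [] (cur.reverse :: acc) (by omega)]
        simp [splitOn', hx, List.modifyHead]
        cases hS : splitOn' xs with
        | nil => exact absurd hS (splitOn'_ne_nil xs)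
        | cons a t => simp
      · have hp : List.isPrefixOf ['-'] (x :: xs) = false := by
          simp [List.isPrefixOf]
          exact fun hc => absurd hc.symm hx
        rw [if_neg (by simp [hp])]
        simp only [List.length_cons] at h
        rw [ih f (x :: cur) acc (by omega)]
        simp only [splitOn', if_neg hx]
        cases hS : splitOn' xs with
        | nil => exact absurd hS (splitOn'_ne_nil xs)
        | cons a t => simp

theorem splitOn_eq (l : List Char) : PySem.Chars.splitOn l ['-'] = splitOn' l := by
  rw [PySem.Chars.splitOn, splitOn_go_eq l (l.length + 1) [] [] (by omega)]
  cases hS : splitOn' l with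
  | nil => exact absurd hS (splitOn'_ne_nil l)
  | cons a t => simp

theorem length_splitOn'_eq_one (l : List Char) : (splitOn' l).length = 1 ↔ '-' ∉ l := by
  induction l with
  | nil => simp [splitOn']
  | cons x xs ih =>
    simp only [splitOn']
    by_cases hx : x = '-'
    · subst hx
      simp only [List.mem_cons]
      have := splitOn'_ne_nil xs
      cases hS : splitOn' xs <;> simp_all
    · simp only [if_neg hx, List.length_modifyHead, ih, List.mem_cons]
      constructor
      · intro h hc
        rcases hc with hc | hc
        · exact hx hc.symm
        · exact h hc
      · intro h hc; exact h (Or.inr hc)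

theorem fRef_eq_none (l : List Char) : fRef l = none ↔ '-' ∉ l := by
  induction l with
  | nil => simp [fRef]
  | cons x xs ih =>
    simp only [fRef, List.mem_cons]
    cases h : fRef xs with
    | some t =>
      have : '-' ∈ xs := by
        by_contra hm
        rw [← ih] at hm
        rw [h] at hm; exact absurd hm (by simp)
      simp only [reduceCtorEq, false_iff]
      tauto
    | none =>
      have hm : '-' ∉ xs := by rw [← ih, h]
      by_cases hx : x = '-'
      · simp only [if_pos hx, reduceCtorEq, false_iff]
        tauto
      · simp only [if_neg hx, true_iff]
        intro hc
        rcases hc with hc | hc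
        · exact hx hc.symm
        · exact hm hc

-- the concatenation produced by A's loop body over a segment list L
def jCat (L : List (List Char)) : List Char := (L.map (fun q => '-' :: q)).flatten

theorem jCat_nil : jCat [] = [] := by simp [jCat]
theorem jCat_cons (q : List Char) (L : List (List Char)) :
    jCat (q :: L) = '-' :: (q ++ jCat L) := by simp [jCat]

theorem fRef_of_mem (l : List Char) (h : '-' ∈ l) :
    fRef l = some ((jCat (splitOn' l).dropLast).tail) := by
  induction l with
  | nil => simp at h
  | cons x xs ih =>
    by_cases hm : '-' ∈ xs
    · have hx := ih hm
      have hSne := splitOn'_ne_nil xs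
      obtain ⟨q, S', hS⟩ : ∃ q S', splitOn' xs = q :: S' := by
        cases hS : splitOn' xs with
        | nil => exact absurd hS hSne
        | cons a t => exact ⟨a, t, rfl⟩
      have hS'ne : S' ≠ [] := by
        intro he
        have : (splitOn' xs).length = 1 := by rw [hS, he]; rfl
        exact absurd ((length_splitOn'_eq_one xs).mp this) (by simpa using hm)
      simp only [fRef, hx]
      by_cases hxc : x = '-'
      · simp only [splitOn', if_pos hxc]
        rw [List.dropLast_cons_of_ne_nil hSne]
        rw [hS, List.dropLast_cons_of_ne_nil hS'ne]
        rw [jCat_cons, jCat_cons]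
        simp
        rw [jCat_cons, hxc]
      · simp only [splitOn', if_neg hxc]
        rw [hS, List.modifyHead_cons, List.dropLast_cons_of_ne_nil hS'ne,
            List.dropLast_cons_of_ne_nil hS'ne]
        rw [jCat_cons, jCat_cons]
        simp
    · have hxc : x = '-' := by
        rcases List.mem_cons.mp h with h1 | h2
        · exact h1.symm
        · exact absurd h2 hm
      have hnone : fRef xs = none := (fRef_eq_none xs).mpr hm
      have hS1 : (splitOn' xs).length = 1 := (length_splitOn'_eq_one xs).mpr hm
      obtain ⟨p, hS⟩ : ∃ p, splitOn' xs = [p] := by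
        cases hS : splitOn' xs with
        | nil => exact absurd hS (splitOn'_ne_nil xs)
        | cons a t =>
          rw [hS] at hS1; simp at hS1
          exact ⟨a, by rw [hS1]⟩
      simp only [fRef, hnone, if_pos hxc]
      simp only [splitOn', if_pos hxc, hS]
      rw [List.dropLast_cons_of_ne_nil (by simp)]
      simp [jCat_cons, jCat_nil]

theorem pyRange_nil (a : ℤ) : PySem.List.pyRange a a = [] := by
  simp [PySem.List.pyRange]

theorem pyRange_single (a : ℤ) : PySem.List.pyRange a (a + 1) = [a] := by
  rw [PySem.List.pyRange_one_cons (a := a) (b := a + 1) (by omega)]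
  rw [pyRange_nil]

theorem pyRange_snoc (n : ℕ) :
    PySem.List.pyRange 0 ((n : ℤ) + 1) = PySem.List.pyRange 0 (n : ℤ) ++ [(n : ℤ)] := by
  rw [PySem.List.pyRange_one_append 0 (n : ℤ) ((n : ℤ) + 1) (by omega) (by omega),
      pyRange_single]

theorem loop_eq (parts : List (List Char)) (init : List Char) :
    ∀ n : ℕ, n ≤ parts.length →
    (PySem.List.pyRange 0 (n : ℤ)).foldl
        (fun f i => f ++ ('-' :: PySem.List.pyGetD parts i [])) init
      = init ++ jCat (parts.take n) := by
  intro n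
  induction n with
  | zero => simp [jCat_nil]
  | succ n ih =>
    intro h
    have hn : n < parts.length := by omega
    push_cast
    rw [pyRange_snoc, List.foldl_append, ih (by omega)]
    simp only [List.foldl_cons, List.foldl_nil]
    rw [List.take_add_one]
    have : parts[n]? = some parts[n] := List.getElem?_eq_getElem hn
    rw [this]
    simp only [Option.toList_some]
    rw [PySem.List.pyGetD, PySem.List.pyGet?_natCast, this]
    simp [jCat, List.map_take]
    rw [List.take_add_one, List.getElem?_map, this]
    simp

theorem A_eq_fRef (l : List Char) : definePadreGo l = fRef l := by
  unfold definePadreGo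
  rw [splitOn_eq]
  have hne := splitOn'_ne_nil l
  have hpos : 1 ≤ (splitOn' l).length := List.length_pos_iff.mpr hne
  by_cases h1 : (splitOn' l).length = 1
  · rw [if_pos (by simp [PySem.List.len, h1])]
    exact ((fRef_eq_none l).mpr ((length_splitOn'_eq_one l).mp h1)).symm
  · rw [if_neg (by simp [PySem.List.len]; omega)]
    have hcast : ((PySem.List.len (splitOn' l)) - 1 : ℤ)
        = (((splitOn' l).length - 1 : ℕ) : ℤ) := by
      simp [PySem.List.len]; omega
    rw [hcast, loop_eq (splitOn' l) [] ((splitOn' l).length - 1) (by omega)]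
    rw [List.nil_append, ← List.dropLast_eq_take]
    show some (PySem.List.slice (jCat (splitOn' l).dropLast) (some 1) none) = fRef l
    rw [PySem.List.slice_from_one]
    have hm : '-' ∈ l := by
      by_contra hc
      exact h1 ((length_splitOn'_eq_one l).mpr hc)
    rw [fRef_of_mem l hm]

theorem pre_single (x : Char) (l : List Char) :
    List.isPrefixOf ['-'] (x :: l) = ('-' == x) := by
  simp [List.isPrefixOf]

theorem rfind_go_ge (s : List Char) (sub : List Char) :
    ∀ j : ℕ, -1 ≤ PySem.Chars.rfind.go s sub j := by
  intro j
  induction j with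
  | zero => rw [PySem.Chars.rfind.go.eq_def]; simp only []; split_ifs <;> omega
  | succ j ih => rw [PySem.Chars.rfind.go.eq_def]; simp only []; split_ifs <;> omega

theorem rfind_go_cons (x : Char) (xs : List Char) :
    ∀ j : ℕ, PySem.Chars.rfind.go (x :: xs) ['-'] (j + 1)
      = if PySem.Chars.rfind.go xs ['-'] j = -1 then (if x = '-' then 0 else -1)
        else PySem.Chars.rfind.go xs ['-'] j + 1 := by
  intro j
  induction j with
  | zero =>
    rw [PySem.Chars.rfind.go.eq_def]
    simp only [List.drop_succ_cons, List.drop_zero]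
    conv_rhs => rw [PySem.Chars.rfind.go.eq_def]
    by_cases hp : List.isPrefixOf ['-'] xs = true
    · rw [if_pos hp, if_pos hp]
      norm_num
    · rw [if_neg hp, if_neg hp]
      rw [PySem.Chars.rfind.go.eq_def]
      by_cases hx : x = '-'
      · have h1 : List.isPrefixOf ['-'] (x :: xs) = true := by rw [pre_single]; simp [hx]
        rw [if_pos h1]; simp [hx]
      · have h1 : ¬ List.isPrefixOf ['-'] (x :: xs) = true := by
          rw [pre_single]; simp; exact fun h => absurd h.symm hx
        rw [if_neg h1]; simp [hx]
  | succ j ih =>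
    conv_lhs => rw [PySem.Chars.rfind.go.eq_def]
    conv_rhs => rw [PySem.Chars.rfind.go.eq_def]
    simp only [List.drop_succ_cons]
    by_cases hp : List.isPrefixOf ['-'] (List.drop (j + 1) xs) = true
    · rw [if_pos hp, if_pos hp]
      split_ifs <;> first | omega | simp_all
    · rw [if_neg hp, if_neg hp, ih]

theorem rfind_nil : PySem.Chars.rfind ([] : List Char) ['-'] = -1 := by
  rw [PySem.Chars.rfind, PySem.Chars.rfind.go.eq_def]
  simp

theorem rfind_cons (x : Char) (xs : List Char) :
    PySem.Chars.rfind (x :: xs) ['-']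
      = if PySem.Chars.rfind xs ['-'] = -1 then (if x = '-' then 0 else -1)
        else PySem.Chars.rfind xs ['-'] + 1 := by
  rw [PySem.Chars.rfind, PySem.Chars.rfind]
  simp only [List.length_cons]
  exact rfind_go_cons x xs xs.length

theorem rfind_ge (l : List Char) : -1 ≤ PySem.Chars.rfind l ['-'] :=
  rfind_go_ge l ['-'] l.length

theorem B_eq_fRef (l : List Char) :
    (if PySem.Chars.rfind l ['-'] = -1 then none
     else some (l.take (PySem.Chars.rfind l ['-']).toNat)) = fRef l := by
  induction l with
  | nil => simp [rfind_nil, fRef]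
  | cons x xs ih =>
    rw [rfind_cons]
    by_cases h : PySem.Chars.rfind xs ['-'] = -1
    · rw [if_pos h]
      rw [if_pos h] at ih
      simp only [fRef, ← ih]
      by_cases hx : x = '-' <;> simp [hx]
    · rw [if_neg h]
      have h0 : 0 ≤ PySem.Chars.rfind xs ['-'] := by have := rfind_ge xs; omega
      rw [if_neg h] at ih
      have h1 : ¬ (PySem.Chars.rfind xs ['-'] + 1 = -1) := by omega
      rw [if_neg h1]
      simp only [fRef, ← ih]
      have h2 : (PySem.Chars.rfind xs ['-'] + 1).toNat = (PySem.Chars.rfind xs ['-']).toNat + 1 := by omega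
      rw [h2, List.take_succ_cons]

-- ===== VERDICT (by name: the statement is the Claim_ definition above) =====
theorem definePadre_spec : Claim_equal_definePadre := by
  intro codigo _
  unfold Spec_definePadre definePadre definePadre_alt
  rw [A_eq_fRef, ← B_eq_fRef codigo.toList]
  rw [PySem.Str.rfind_eq, show ("-" : String).toList = ['-'] by decide]
  by_cases h : PySem.Chars.rfind codigo.toList ['-'] = -1
  · simp [h]
  · have h0 : 0 ≤ PySem.Chars.rfind codigo.toList ['-'] := by
      have := rfind_ge codigo.toList; omega
    rw [if_neg h]
    simp only [if_neg h, Option.map_some]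
    rw [PySem.Str.slice, PySem.Chars.slice_eq_listSlice, PySem.List.slice_to _ h0]
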